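-- pv_equiv track=rewrite | github.com/FaustSJ/Python-Recursion-Path | sfaust3_p1.py | vert_path_helper
-- ===== SOURCE A (Python) =====
-- def vert_path_helper(egrid, w, h, curP, path, pathcost):
-- 	if curP[0]>=(h-1):
-- 		#end the recursion
-- 		return (path, pathcost)
-- 	#next_point_index is the column index of the minimum adjacent point
-- 	next_point_index = 0;
-- 	#check whether to add down-left and/or down-right to the path
-- 	#curP[0] is the row, curP[1] is the column
-- 	if curP[1]==0:
-- 		#compare down and down-right
-- 		next_point_index = minimum(egrid[(curP[0]+1)], egrid[(curP[0]+1)][curP[1]], [curP[1]], curP[1], (curP[1]+2))[0]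
-- 	else:
-- 		if curP[1]==(w-1):
-- 			#compare down and down-left
-- 			next_point_index = minimum(egrid[(curP[0]+1)], egrid[(curP[0]+1)][curP[1]-1], [curP[1]-1], (curP[1]-1), (curP[1]+1))[0]
-- 		else:
-- 			#compare down, down-right, and down-left
-- 			next_point_index = minimum(egrid[(curP[0]+1)], egrid[(curP[0]+1)][curP[1]-1], [curP[1]-1], (curP[1]-1), (curP[1]+2))[0]
-- 	#get the next (minimum) point
-- 	next_point = ((curP[0]+1), next_point_index)
-- 	path.append(next_point)
-- 	return vert_path_helper(egrid, w, h, next_point, path, (pathcost+(egrid[(curP[0]+1)][next_point_index])))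
--
-- def minimum(lis, mini, mini_indexes, i, stop):
-- 	if i>=stop:
-- 		return mini_indexes
-- 	if lis[i]<mini:
-- 		mini = lis[i]
-- 		mini_indexes = [i]
-- 	else:
-- 		if lis[i]==mini:
-- 			mini_indexes.append(i)
-- 	return minimum(lis, mini, mini_indexes, (i+1), stop)
-- ===== SOURCE B (Python) =====
-- def vert_path_helper(egrid, w, h, curP, path, pathcost):
--     r, c = curP
--     while r < h - 1:
--         row = egrid[r + 1]
--         if c == 0:
--             c = min(range(0, 2), key=lambda j: row[j])
--         elif c == w - 1:
--             c = min(range(c - 1, c + 1), key=lambda j: row[j])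
--         else:
--             c = min(range(c - 1, c + 2), key=lambda j: row[j])
--         r += 1
--         path.append((r, c))
--         pathcost += row[c]
--     return (path, pathcost)
-- ===== Notes on version B (the rewrite author's own statement) =====
-- stated objective: simpler
-- what changed: Replaced A's pair of recursive functions (tail-recursive descent plus a hand-rolled recursive leftmost-argmin scan collecting an index list) with a single iterative while loop that picks the next column with builtin min over the candidate range.
-- outside the precondition, e.g. on vert_path_helper([[0, 0], [5, 7]], 2, 2, (0, -1), [], 0): A returns ([(1, -2)], 5), B returns ([(1, -2)], 5)
import Mathlib
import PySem

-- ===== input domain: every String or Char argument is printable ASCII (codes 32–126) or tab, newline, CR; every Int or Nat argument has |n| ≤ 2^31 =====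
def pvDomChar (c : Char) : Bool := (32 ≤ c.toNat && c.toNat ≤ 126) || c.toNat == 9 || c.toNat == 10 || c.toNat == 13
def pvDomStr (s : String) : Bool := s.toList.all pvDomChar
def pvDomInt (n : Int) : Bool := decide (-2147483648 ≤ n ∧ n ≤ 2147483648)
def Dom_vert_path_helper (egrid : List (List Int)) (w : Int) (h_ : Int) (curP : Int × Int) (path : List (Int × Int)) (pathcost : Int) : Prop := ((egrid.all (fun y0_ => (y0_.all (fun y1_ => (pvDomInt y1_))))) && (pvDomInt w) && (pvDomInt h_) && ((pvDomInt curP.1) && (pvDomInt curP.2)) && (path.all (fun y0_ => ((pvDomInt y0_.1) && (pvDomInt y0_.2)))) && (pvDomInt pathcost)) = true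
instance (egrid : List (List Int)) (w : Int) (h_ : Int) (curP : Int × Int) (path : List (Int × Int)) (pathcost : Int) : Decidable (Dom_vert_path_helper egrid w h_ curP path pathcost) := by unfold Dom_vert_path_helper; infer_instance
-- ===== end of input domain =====

-- B replaces A's pair of recursions (descent + hand-rolled leftmost-argmin scan) with one
-- iterative loop over the remaining rows choosing the next column with builtin min (objective:
-- simpler).  Python A and B both append to the caller's `path` list in place; the equivalence
-- proved here is about the returned value.

-- ===== PORT A =====
-- A's recursive `minimum` helper; pyGetD is exact under Pre_ (all scanned indices in range)
def minimumA (lis : List Int) (mini : Int) (mini_indexes : List Int) (i stop : Int) : List Int :=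
  if i ≥ stop then mini_indexes
  else
    let v := PySem.List.pyGetD lis i 0
    if v < mini then minimumA lis v [i] (i + 1) stop
    else if v = mini then minimumA lis mini (mini_indexes ++ [i]) (i + 1) stop
    else minimumA lis mini mini_indexes (i + 1) stop
termination_by (stop - i).toNat
decreasing_by all_goals omega

def vert_path_helper (egrid : List (List Int)) (w : Int) (h_ : Int) (curP : Int × Int) (path : List (Int × Int)) (pathcost : Int) : (List (Int × Int)) × Int :=
  if curP.1 ≥ h_ - 1 then (path, pathcost)
  else
    let row := PySem.List.pyGetD egrid (curP.1 + 1) []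
    let npi :=
      if curP.2 = 0 then
        (minimumA row (PySem.List.pyGetD row curP.2 0) [curP.2] curP.2 (curP.2 + 2)).headD 0
      else if curP.2 = w - 1 then
        (minimumA row (PySem.List.pyGetD row (curP.2 - 1) 0) [curP.2 - 1] (curP.2 - 1) (curP.2 + 1)).headD 0
      else
        (minimumA row (PySem.List.pyGetD row (curP.2 - 1) 0) [curP.2 - 1] (curP.2 - 1) (curP.2 + 2)).headD 0
    vert_path_helper egrid w h_ (curP.1 + 1, npi) (path ++ [(curP.1 + 1, npi)])
      (pathcost + PySem.List.pyGetD row npi 0)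
termination_by (h_ - 1 - curP.1).toNat
decreasing_by omega

-- ===== PORT B =====
-- one iteration of B's while loop: pick the leftmost-minimal candidate column below c
def bStep (egrid : List (List Int)) (w : Int) (st : Int × List (Int × Int) × Int) (r : Int) : Int × List (Int × Int) × Int :=
  let row := PySem.List.pyGetD egrid r []
  let c :=
    if st.1 = 0 then
      (PySem.List.min? (PySem.List.pyRange 0 2 1) (fun j => PySem.List.pyGetD row j 0)).getD 0
    else if st.1 = w - 1 then
      (PySem.List.min? (PySem.List.pyRange (st.1 - 1) (st.1 + 1) 1) (fun j => PySem.List.pyGetD row j 0)).getD 0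
    else
      (PySem.List.min? (PySem.List.pyRange (st.1 - 1) (st.1 + 2) 1) (fun j => PySem.List.pyGetD row j 0)).getD 0
  (c, st.2.1 ++ [(r, c)], st.2.2 + PySem.List.pyGetD row c 0)

def vert_path_helper_alt (egrid : List (List Int)) (w : Int) (h_ : Int) (curP : Int × Int) (path : List (Int × Int)) (pathcost : Int) : (List (Int × Int)) × Int :=
  let res := (PySem.List.pyRange (curP.1 + 1) h_ 1).foldl (bStep egrid w) (curP.2, path, pathcost)
  (res.2.1, res.2.2)

-- ===== PRECONDITION & SPEC =====
-- Pre_ excludes inputs on which A normally raises IndexError: non-rectangular grids, h larger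
-- than the number of rows, width < 2, or a start position outside [0,h)×[0,w) (unless the row
-- index is already past h-1, where A returns immediately).  On a few such inputs Python's
-- negative-index wraparound lets A return a path of negative column indices; that accidental
-- value is excluded as an implementation artefact.
def Pre_vert_path_helper (egrid : List (List Int)) (w : Int) (h_ : Int) (curP : Int × Int) (path : List (Int × Int)) (pathcost : Int) : Prop :=
  curP.1 ≥ h_ - 1 ∨
    (h_ ≤ (egrid.length : Int) ∧ (∀ r ∈ egrid, (r.length : Int) = w) ∧ 2 ≤ w ∧
      0 ≤ curP.1 ∧ 0 ≤ curP.2 ∧ curP.2 < w)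
instance (egrid : List (List Int)) (w : Int) (h_ : Int) (curP : Int × Int) (path : List (Int × Int)) (pathcost : Int) : Decidable (Pre_vert_path_helper egrid w h_ curP path pathcost) := by unfold Pre_vert_path_helper; infer_instance

def pvWitness_vert_path_helper : List (List Int) × Int × Int × (Int × Int) × (List (Int × Int)) × Int :=
  ([[1, 2], [3, 0]], 2, 2, (0, 0), [], 0)

def Spec_vert_path_helper (egrid : List (List Int)) (w : Int) (h_ : Int) (curP : Int × Int) (path : List (Int × Int)) (pathcost : Int) (out : (List (Int × Int)) × Int) : Prop := out = vert_path_helper_alt egrid w h_ curP path pathcost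
instance (egrid : List (List Int)) (w : Int) (h_ : Int) (curP : Int × Int) (path : List (Int × Int)) (pathcost : Int) (out : (List (Int × Int)) × Int) : Decidable (Spec_vert_path_helper egrid w h_ curP path pathcost out) := by unfold Spec_vert_path_helper; infer_instance

-- ===== CLAIM (what is proved, stated in full; the proofs are below) =====
def Claim_equal_vert_path_helper : Prop := ∀ (egrid : List (List Int)) (w : Int) (h_ : Int) (curP : Int × Int) (path : List (Int × Int)) (pathcost : Int), Dom_vert_path_helper egrid w h_ curP path pathcost → Pre_vert_path_helper egrid w h_ curP path pathcost → Spec_vert_path_helper egrid w h_ curP path pathcost (vert_path_helper egrid w h_ curP path pathcost)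

-- ===== LEMMAS AND PROOFS =====

-- Python's min over a nonempty list: the option-valued fold started at `some b` is the plain fold
theorem min?_foldl_some (key : Int → Int) (t : List Int) (b : Int) :
    t.foldl
      (fun acc x => match acc with
        | none => some x
        | some m => if key x < key m then some x else some m)
      (some b)
    = some (t.foldl (fun acc x => if key x < key acc then x else acc) b) := by
  induction t generalizing b with
  | nil => rfl
  | cons x t ih =>
      simp only [List.foldl_cons]
      by_cases h : key x < key b <;> simp [h, ih]

-- hence min(x :: t, key) is the plain running-min fold started at x
theorem min?_cons (key : Int → Int) (x : Int) (t : List Int) :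
    PySem.List.min? (x :: t) key =
      some (t.foldl (fun acc y => if key y < key acc then y else acc) x) := by
  rw [PySem.List.min?, List.foldl_cons]
  convert min?_foldl_some key t x using 2
  funext acc y
  cases acc <;> rfl

-- invariant of A's `minimum` scan: the head of the index list is the running leftmost argmin
theorem minimumA_head (row : List Int) (n : Nat) :
    ∀ (b i hi : Int) (idxs : List Int), (hi - i).toNat = n → idxs ≠ [] →
      idxs.headD 0 = b →
      (minimumA row (PySem.List.pyGetD row b 0) idxs i hi).headD 0 =
        (PySem.List.pyRange i hi 1).foldl
          (fun acc j => if PySem.List.pyGetD row j 0 < PySem.List.pyGetD row acc 0 then j else acc) b := by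
  induction n with
  | zero =>
      intro b i hi idxs hn hne hh
      have hih : hi ≤ i := by omega
      rw [minimumA, if_pos (by omega : i ≥ hi), PySem.List.pyRange_one_eq_nil hih,
        List.foldl_nil]
      exact hh
  | succ n ih =>
      intro b i hi idxs hn hne hh
      have hlt : i < hi := by omega
      rw [minimumA, if_neg (by omega : ¬ i ≥ hi), PySem.List.pyRange_one_cons hlt,
        List.foldl_cons]
      by_cases h1 : PySem.List.pyGetD row i 0 < PySem.List.pyGetD row b 0
      · rw [if_pos h1, if_pos h1]
        exact ih i (i + 1) hi [i] (by omega) (by simp) (by simp)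
      · rw [if_neg h1, if_neg h1]
        by_cases h2 : PySem.List.pyGetD row i 0 = PySem.List.pyGetD row b 0
        · rw [if_pos h2]
          refine ih b (i + 1) hi (idxs ++ [i]) (by omega) (by simp) ?_
          cases idxs with
          | nil => exact absurd rfl hne
          | cons a t => simpa using hh
        · rw [if_neg h2]
          exact ih b (i + 1) hi idxs (by omega) hne hh

-- A's scan starting at column lo over [lo, hi) equals B's builtin min over range(lo, hi)
theorem minhead (row : List Int) (lo hi : Int) (h : lo < hi) :
    (minimumA row (PySem.List.pyGetD row lo 0) [lo] lo hi).headD 0 =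
      (PySem.List.min? (PySem.List.pyRange lo hi 1) (fun j => PySem.List.pyGetD row j 0)).getD 0 := by
  rw [PySem.List.pyRange_one_cons h, min?_cons]
  rw [minimumA_head row (hi - lo).toNat lo lo hi [lo] rfl (by simp) (by simp)]
  rw [PySem.List.pyRange_one_cons h, List.foldl_cons, if_neg (lt_irrefl _)]
  rfl

theorem main_eq (n : Nat) : ∀ (egrid : List (List Int)) (w h_ r c : Int) (path : List (Int × Int)) (cost : Int),
    (h_ - 1 - r).toNat = n →
    vert_path_helper egrid w h_ (r, c) path cost = vert_path_helper_alt egrid w h_ (r, c) path cost := by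
  induction n with
  | zero =>
      intro egrid w h_ r c path cost hn
      rw [vert_path_helper, if_pos (by omega : ((r, c) : Int × Int).1 ≥ h_ - 1)]
      unfold vert_path_helper_alt
      rw [PySem.List.pyRange_one_eq_nil (by omega : h_ ≤ ((r, c) : Int × Int).1 + 1)]
      rfl
  | succ n ih =>
      intro egrid w h_ r c path cost hn
      have hlt : ¬ ((r, c) : Int × Int).1 ≥ h_ - 1 := by omega
      -- the A-side row and chosen column
      have hA : vert_path_helper egrid w h_ (r, c) path cost =
          (let row := PySem.List.pyGetD egrid (r + 1) []
           let npi :=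
             if c = 0 then
               (minimumA row (PySem.List.pyGetD row c 0) [c] c (c + 2)).headD 0
             else if c = w - 1 then
               (minimumA row (PySem.List.pyGetD row (c - 1) 0) [c - 1] (c - 1) (c + 1)).headD 0
             else
               (minimumA row (PySem.List.pyGetD row (c - 1) 0) [c - 1] (c - 1) (c + 2)).headD 0
           vert_path_helper egrid w h_ (r + 1, npi) (path ++ [(r + 1, npi)])
             (cost + PySem.List.pyGetD row npi 0)) := by
        conv_lhs => rw [vert_path_helper]
        rw [if_neg hlt]
      rw [hA]
      -- one unrolling of B's fold
      have hB : vert_path_helper_alt egrid w h_ (r, c) path cost =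
          vert_path_helper_alt egrid w h_ (r + 1, (bStep egrid w (c, path, cost) (r + 1)).1)
            (bStep egrid w (c, path, cost) (r + 1)).2.1
            (bStep egrid w (c, path, cost) (r + 1)).2.2 := by
        unfold vert_path_helper_alt
        rw [PySem.List.pyRange_one_cons (by omega : r + 1 < h_), List.foldl_cons]
      rw [hB]
      -- the two column choices (and hence states) coincide
      have hstep : bStep egrid w (c, path, cost) (r + 1) =
          (let row := PySem.List.pyGetD egrid (r + 1) []
           let npi :=
             if c = 0 then
               (minimumA row (PySem.List.pyGetD row c 0) [c] c (c + 2)).headD 0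
             else if c = w - 1 then
               (minimumA row (PySem.List.pyGetD row (c - 1) 0) [c - 1] (c - 1) (c + 1)).headD 0
             else
               (minimumA row (PySem.List.pyGetD row (c - 1) 0) [c - 1] (c - 1) (c + 2)).headD 0
           (npi, path ++ [(r + 1, npi)], cost + PySem.List.pyGetD row npi 0)) := by
        by_cases h0 : c = 0
        · subst h0
          simp only [bStep, if_true]
          rw [minhead _ 0 (0 + 2) (by omega)]
          norm_num
        · simp only [bStep, if_neg h0]
          by_cases h1 : c = w - 1
          · simp only [if_pos h1]
            rw [minhead _ (c - 1) (c + 1) (by omega)]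
          · simp only [if_neg h1]
            rw [minhead _ (c - 1) (c + 2) (by omega)]
      rw [hstep]
      exact ih egrid w h_ (r + 1) _ _ _ (by omega)

-- ===== VERDICT (by name: the statement is the Claim_ definition above) =====
theorem vert_path_helper_spec : Claim_equal_vert_path_helper := by
  intro egrid w h_ curP path pathcost _ _
  unfold Spec_vert_path_helper
  obtain ⟨r, c⟩ := curP
  exact (main_eq (h_ - 1 - r).toNat egrid w h_ r c path pathcost rfl).symm ▸ rfl
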